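-- pv_equiv track=rewrite | github.com/igrynok/learning-snippets | python/google_qa/min_subarrays.py | min_decreasing_partitions
-- ===== SOURCE A (Python) =====
-- from typing import List
--
-- def min_decreasing_partitions(arr: List[int]) -> int:
--
--     def binary_insert(elem):
--         left, right = 0, len(ends) - 1
--         first_true_index = -1
--         while left <= right:
--             mid = (left + right) // 2
--             if ends[mid] > elem:
--                 first_true_index = mid
--                 right = mid - 1
--             else:
--                 left = mid + 1
--         return first_true_index
--
--     ends = []
--
--     for elem in arr:
--         first_index = binary_insert(elem)
--         if first_index >= 0:
--             ends[first_index] = elem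
--         else:
--             ends.append(elem)
--
--     return len(ends)
-- ===== SOURCE B (Python) =====
-- def min_decreasing_partitions(arr):
--     # O(n^2) DP: length of the longest non-decreasing subsequence,
--     # maintained as per-element chain lengths instead of a tails array.
--     prev = []   # list of (value, length of longest non-decreasing subsequence ending there)
--     best = 0
--     for x in arr:
--         m = 0
--         for v, l in prev:
--             if v <= x:
--                 m = max(m, l)
--         d = 1 + m
--         prev.append((x, d))
--         best = max(best, d)
--     return best
-- ===== Notes on version B (the rewrite author's own statement) =====
-- stated objective: alternative
-- what changed: replaces patience-sorting (binary search over a maintained tails array) by a quadratic dynamic program that records, per element, the length of the longest non-decreasing subsequence ending there and returns the maximum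
import Mathlib
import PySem

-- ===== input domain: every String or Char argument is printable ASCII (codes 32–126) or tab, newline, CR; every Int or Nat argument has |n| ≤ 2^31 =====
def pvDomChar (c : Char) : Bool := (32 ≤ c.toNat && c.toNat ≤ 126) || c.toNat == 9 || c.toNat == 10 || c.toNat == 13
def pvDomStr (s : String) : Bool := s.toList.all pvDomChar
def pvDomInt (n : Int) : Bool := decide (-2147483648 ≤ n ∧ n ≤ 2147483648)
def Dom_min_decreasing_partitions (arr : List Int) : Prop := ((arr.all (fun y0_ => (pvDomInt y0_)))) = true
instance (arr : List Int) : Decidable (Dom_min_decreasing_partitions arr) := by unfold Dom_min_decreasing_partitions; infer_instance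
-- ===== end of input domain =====

-- B replaces A's patience-sorting tails array (binary search + in-place update) by a
-- quadratic per-element dynamic program for the longest non-decreasing subsequence.

-- ===== PORT A =====
-- helper `binary_insert`: the while-loop, recursing on the shrinking interval.
-- `mid` is always a valid index here (0 ≤ left ≤ mid ≤ right < len), so the total
-- pyGetD is exact for Python's ends[mid].
def pvBSearch (ends : List Int) (elem left right fti : Int) : Int :=
  if h : left ≤ right then
    let mid := PySem.Int.floordiv (left + right) 2
    if PySem.List.pyGetD ends mid 0 > elem then
      pvBSearch ends elem left (mid - 1) mid
    else
      pvBSearch ends elem (mid + 1) right fti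
  else fti
termination_by (right - left + 1).toNat
decreasing_by
  · have := PySem.Int.floordiv_two_mid_bounds h; omega
  · have := PySem.Int.floordiv_two_mid_bounds h; omega

-- one iteration of A's for-loop (first_index ≥ 0 is a valid index, so pySetD is exact)
def pvStepA (ends : List Int) (elem : Int) : List Int :=
  let fi := pvBSearch ends elem 0 ((ends.length : Int) - 1) (-1)
  if fi ≥ 0 then PySem.List.pySetD ends fi elem else ends ++ [elem]

def min_decreasing_partitions (arr : List Int) : Int :=
  ((arr.foldl pvStepA []).length : Int)

-- ===== PORT B =====
-- inner loop of Source B: m = max over (v, l) in prev with v ≤ x of l, else 0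
def pvMaxLe (prev : List (Int × Int)) (x : Int) : Int :=
  prev.foldl (fun m p => if p.1 ≤ x then max m p.2 else m) 0

-- one iteration of Source B's outer loop over state (prev, best)
def pvStepB (st : List (Int × Int) × Int) (x : Int) : List (Int × Int) × Int :=
  let d := 1 + pvMaxLe st.1 x
  (st.1 ++ [(x, d)], max st.2 d)

def min_decreasing_partitions_alt (arr : List Int) : Int :=
  (arr.foldl pvStepB ([], 0)).2

-- ===== PRECONDITION & SPEC =====
def Spec_min_decreasing_partitions (arr : List Int) (out : Int) : Prop := out = min_decreasing_partitions_alt arr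
instance (arr : List Int) (out : Int) : Decidable (Spec_min_decreasing_partitions arr out) := by unfold Spec_min_decreasing_partitions; infer_instance

-- ===== CLAIM (what is proved, stated in full; the proofs are below) =====
def Claim_equal_min_decreasing_partitions : Prop := ∀ (arr : List Int), Dom_min_decreasing_partitions arr → Spec_min_decreasing_partitions arr (min_decreasing_partitions arr)

-- ===== LEMMAS AND PROOFS =====

-- In a sorted (≤) list, the elements satisfying (· ≤ x) are exactly the first countP of them.
lemma pvCountP_zero_of_lt (ends : List Int) (x : Int)
    (hall : ∀ e ∈ ends, x < e) :
    ends.countP (fun e => decide (e ≤ x)) = 0 := by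
  rw [List.countP_eq_zero]
  intro e he
  simpa using not_le.mpr (hall e he)

lemma pvFact1 (x : Int) : ∀ (ends : List Int), ends.Pairwise (· ≤ ·) →
    ∀ (i : Nat) (h : i < ends.length),
    i < ends.countP (fun e => decide (e ≤ x)) → ends[i] ≤ x := by
  intro ends
  induction ends with
  | nil => intro _ i h; simp at h
  | cons e t ih =>
    intro hs i h hc
    rw [List.countP_cons] at hc
    by_cases hex : e ≤ x
    · cases i with
      | zero => simpa using hex
      | succ j =>
        simp only [hex, decide_true, if_true] at hc
        simpa using ih hs.of_cons j (by simpa using h) (by omega)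
    · have h0 : t.countP (fun e => decide (e ≤ x)) = 0 :=
        pvCountP_zero_of_lt t x
          (fun a ha => lt_of_lt_of_le (not_le.mp hex) (List.rel_of_pairwise_cons hs ha))
      simp [hex, h0] at hc

lemma pvFact2 (x : Int) : ∀ (ends : List Int), ends.Pairwise (· ≤ ·) →
    ∀ (i : Nat) (h : i < ends.length),
    ends.countP (fun e => decide (e ≤ x)) ≤ i → x < ends[i] := by
  intro ends
  induction ends with
  | nil => intro _ i h; simp at h
  | cons e t ih =>
    intro hs i h hc
    rw [List.countP_cons] at hc
    by_cases hex : e ≤ x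
    · simp only [hex, decide_true, if_true] at hc
      cases i with
      | zero => omega
      | succ j => simpa using ih hs.of_cons j (by simpa using h) (by omega)
    · have hxe : x < e := not_le.mp hex
      cases i with
      | zero => simpa using hxe
      | succ j =>
        have hj : j < t.length := by simpa using h
        have : e ≤ t[j] := List.rel_of_pairwise_cons hs (List.getElem_mem hj)
        simpa using lt_of_lt_of_le hxe this

-- when the while-loop exits, first_true_index is the first index with ends[k] > elem (or -1)
lemma pvBSearch_exit (ends : List Int) (elem l r fti : Int)
    (hs : ends.Pairwise (· ≤ ·))
    (hlr : ¬ l ≤ r) (hl0 : 0 ≤ l) (_hr : r ≤ (ends.length : Int) - 1) (hlr1 : l ≤ r + 1)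
    (h4 : ∀ i : Nat, (i : Int) < l → ∀ (h : i < ends.length), ends[i] ≤ elem)
    (h5 : ∀ i : Nat, r < (i : Int) → ∀ (h : i < ends.length), elem < ends[i])
    (hfti : fti = (if r + 1 < (ends.length : Int) then r + 1 else -1)) :
    fti = (if (ends.countP (fun e => decide (e ≤ elem)) : Int) < (ends.length : Int)
           then (ends.countP (fun e => decide (e ≤ elem)) : Int) else -1) := by
  have hlen : ends.countP (fun e => decide (e ≤ elem)) ≤ ends.length :=
    List.countP_le_length
  have hleq : l = r + 1 := by omega
  have hcl : (ends.countP (fun e => decide (e ≤ elem)) : Int) = l := by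
    by_contra hne
    rcases lt_or_gt_of_ne hne with hlt | hgt
    · -- c < l = r+1 ≤ len, so index c is valid, ≤ elem by h4, > elem by pvFact2
      have hclen : ends.countP (fun e => decide (e ≤ elem)) < ends.length := by omega
      have h1 := h4 _ (by exact_mod_cast hlt) hclen
      have h2 := pvFact2 elem ends hs _ hclen (le_refl _)
      omega
    · -- l < c ≤ len, so index l is valid, > elem by h5, ≤ elem by pvFact1
      have hmlen : l.toNat < ends.length := by omega
      have h1 := h5 l.toNat (by omega) hmlen
      have h2 := pvFact1 elem ends hs l.toNat hmlen (by omega)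
      omega
  rw [hfti]
  split_ifs <;> omega

lemma pvBSearch_spec (ends : List Int) (elem : Int) (hs : ends.Pairwise (· ≤ ·)) :
    ∀ (fuel : Nat) (l r fti : Int), (r - l + 1).toNat ≤ fuel →
    0 ≤ l → r ≤ (ends.length : Int) - 1 → l ≤ r + 1 →
    (∀ i : Nat, (i : Int) < l → ∀ (h : i < ends.length), ends[i] ≤ elem) →
    (∀ i : Nat, r < (i : Int) → ∀ (h : i < ends.length), elem < ends[i]) →
    fti = (if r + 1 < (ends.length : Int) then r + 1 else -1) →
    pvBSearch ends elem l r fti =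
      (if (ends.countP (fun e => decide (e ≤ elem)) : Int) < (ends.length : Int)
       then (ends.countP (fun e => decide (e ≤ elem)) : Int) else -1) := by
  intro fuel
  induction fuel with
  | zero =>
    intro l r fti hfuel hl0 hr hlr1 h4 h5 hfti
    have hlr : ¬ l ≤ r := by omega
    rw [pvBSearch.eq_def, dif_neg hlr]
    exact pvBSearch_exit ends elem l r fti hs hlr hl0 hr hlr1 h4 h5 hfti
  | succ fuel ih =>
    intro l r fti hfuel hl0 hr hlr1 h4 h5 hfti
    by_cases hlr : l ≤ r
    · rw [pvBSearch.eq_def, dif_pos hlr]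
      have hmid := PySem.Int.floordiv_two_mid_bounds hlr
      set mid := PySem.Int.floordiv (l + r) 2 with hmiddef
      have hm0 : 0 ≤ mid := by omega
      have hmlen : mid.toNat < ends.length := by omega
      have hmcast : (mid.toNat : Int) = mid := Int.toNat_of_nonneg hm0
      have hget : PySem.List.pyGetD ends mid 0 = ends[mid.toNat] := by
        rw [PySem.List.pyGetD_of_nonneg ends 0 hm0, List.getD_eq_getElem ends 0 hmlen]
      show (if PySem.List.pyGetD ends mid 0 > elem then pvBSearch ends elem l (mid - 1) mid
        else pvBSearch ends elem (mid + 1) r fti) = _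
      rw [hget]
      have hsg := List.pairwise_iff_getElem.mp hs
      by_cases hgt : ends[mid.toNat] > elem
      · rw [if_pos hgt]
        apply ih l (mid - 1) mid (by omega) hl0 (by omega) (by omega) h4
        · intro i hi h
          rcases Nat.lt_or_ge mid.toNat i with hlt | hge
          · exact lt_of_lt_of_le hgt (hsg mid.toNat i hmlen h hlt)
          · have : i = mid.toNat := by omega
            subst this; exact hgt
        · rw [if_pos (by omega)]; omega
      · rw [if_neg hgt]
        apply ih (mid + 1) r fti (by omega) (by omega) hr (by omega)
        · intro i hi h
          rcases Nat.lt_or_ge i mid.toNat with hlt | hge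
          · exact le_trans (hsg i mid.toNat h hmlen hlt) (not_lt.mp hgt)
          · have : i = mid.toNat := by omega
            subst this; exact not_lt.mp hgt
        · exact h5
        · exact hfti
    · rw [pvBSearch.eq_def, dif_neg hlr]
      exact pvBSearch_exit ends elem l r fti hs hlr hl0 hr hlr1 h4 h5 hfti

lemma pvBSearch_eq (ends : List Int) (elem : Int) (hs : ends.Pairwise (· ≤ ·)) :
    pvBSearch ends elem 0 ((ends.length : Int) - 1) (-1) =
      (if (ends.countP (fun e => decide (e ≤ elem)) : Int) < (ends.length : Int)
       then (ends.countP (fun e => decide (e ≤ elem)) : Int) else -1) := by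
  apply pvBSearch_spec ends elem hs ends.length 0 ((ends.length : Int) - 1) (-1)
    (by omega) (by omega) (by omega) (by omega)
  · intro i hi h; omega
  · intro i hi h; omega
  · split_ifs <;> omega

-- replacing one element changes countP by the difference of the two indicator bits
lemma pvCountP_set (l : List Int) (i : Nat) (h : i < l.length) (v : Int) (p : Int → Bool) :
    (l.set i v).countP p + (if p l[i] then 1 else 0) = l.countP p + (if p v then 1 else 0) := by
  conv_lhs => rw [List.set_eq_take_append_cons_drop, if_pos h]
  conv_rhs => rw [show l.countP p = (l.take i ++ l[i] :: l.drop (i + 1)).countP p by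
    rw [List.getElem_cons_drop, List.take_append_drop]]
  simp only [List.countP_append, List.countP_cons]
  omega

-- the loop invariant tying A's tails array to B's (value, chain-length) list
def pvInv (prev : List (Int × Int)) (ends : List Int) (best : Int) : Prop :=
  ends.Pairwise (· ≤ ·) ∧ best = (ends.length : Int) ∧
  ∀ y : Int, (ends.countP (fun e => decide (e ≤ y)) : Int) = pvMaxLe prev y

lemma pvMaxLe_concat (prev : List (Int × Int)) (x d y : Int) :
    pvMaxLe (prev ++ [(x, d)]) y =
      if x ≤ y then max (pvMaxLe prev y) d else pvMaxLe prev y := by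
  simp [pvMaxLe]

lemma pvStep_inv (prev : List (Int × Int)) (ends : List Int) (best x : Int)
    (h : pvInv prev ends best) :
    pvInv (prev ++ [(x, 1 + pvMaxLe prev x)]) (pvStepA ends x)
      (max best (1 + pvMaxLe prev x)) := by
  obtain ⟨hs, hb, hcnt⟩ := h
  have hcx : (ends.countP (fun e => decide (e ≤ x)) : Int) = pvMaxLe prev x := hcnt x
  have hclen : ends.countP (fun e => decide (e ≤ x)) ≤ ends.length :=
    List.countP_le_length
  set c := ends.countP (fun e => decide (e ≤ x)) with hcdef
  simp only [pvStepA]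
  rw [pvBSearch_eq ends x hs]
  by_cases hlt : (c : Int) < (ends.length : Int)
  · rw [if_pos hlt, if_pos (by omega : (c : Int) ≥ 0),
      PySem.List.pySetD_of_nonneg ends x (by omega), Int.toNat_natCast]
    have cN : c < ends.length := by exact_mod_cast hlt
    have hF1 : ∀ (i : Nat) (hi : i < ends.length), i < c → ends[i] ≤ x :=
      fun i hi hic => pvFact1 x ends hs i hi hic
    have hgtc : x < ends[c] := pvFact2 x ends hs c cN (le_refl _)
    have hsg := List.pairwise_iff_getElem.mp hs
    refine ⟨?_, ?_, ?_⟩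
    · -- sortedness is preserved by the replacement
      rw [List.pairwise_iff_getElem]
      intro i j hi hj hij
      simp only [List.length_set] at hi hj
      rw [List.getElem_set, List.getElem_set]
      split_ifs with h1 h2 h2
      · omega
      · exact le_of_lt (pvFact2 x ends hs j hj (by omega))
      · exact hF1 i hi (by omega)
      · exact hsg i j hi hj hij
    · simp only [List.length_set]
      rw [hb, ← hcx]
      omega
    · intro y
      rw [pvMaxLe_concat, ← hcnt y, ← hcx]
      have hkey := pvCountP_set ends c cN x (fun e => decide (e ≤ y))
      by_cases hxy : x ≤ y
      · by_cases hcy : ends[c] ≤ y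
        · -- count unchanged; it is already ≥ c + 1
          have hge : c < ends.countP (fun e => decide (e ≤ y)) := by
            by_contra hle
            exact absurd (pvFact2 y ends hs c cN (by omega)) (not_lt.mpr hcy)
          have hkey' : (ends.set c x).countP (fun e => decide (e ≤ y)) =
              ends.countP (fun e => decide (e ≤ y)) := by
            simpa [hxy, hcy] using hkey
          rw [if_pos hxy, hkey']
          omega
        · -- count grows by one; it was exactly c
          have hle : ends.countP (fun e => decide (e ≤ y)) ≤ c := by
            by_contra hgt'
            exact absurd (pvFact1 y ends hs c cN (by omega)) hcy
          have hge : c ≤ ends.countP (fun e => decide (e ≤ y)) := by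
            rcases Nat.eq_zero_or_pos c with hc0 | hcpos
            · omega
            · by_contra hlt'
              have hcm : c - 1 < ends.length := by omega
              have := pvFact2 y ends hs (c - 1) hcm (by omega)
              have := hF1 (c - 1) hcm (by omega)
              omega
          have hkey' : (ends.set c x).countP (fun e => decide (e ≤ y)) =
              ends.countP (fun e => decide (e ≤ y)) + 1 := by
            simpa [hxy, hcy] using hkey
          rw [if_pos hxy, hkey']
          omega
      · -- y < x < ends[c]: neither indicator holds, count unchanged, max with nothing
        have hcy : ¬ ends[c] ≤ y := by omega
        have hkey' : (ends.set c x).countP (fun e => decide (e ≤ y)) =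
            ends.countP (fun e => decide (e ≤ y)) := by
          simpa [hxy, hcy] using hkey
        rw [if_neg hxy, hkey']
  · rw [if_neg hlt, if_neg (by omega : ¬ (-1 : Int) ≥ 0)]
    have hceq : c = ends.length := by omega
    have hall : ∀ e ∈ ends, e ≤ x := by
      intro e he
      obtain ⟨i, hi, rfl⟩ := List.mem_iff_getElem.mp he
      exact pvFact1 x ends hs i hi (by omega)
    refine ⟨?_, ?_, ?_⟩
    · rw [List.pairwise_append]
      exact ⟨hs, by simp, fun a ha b hb => by simp at hb; subst hb; exact hall a ha⟩
    · simp only [List.length_append, List.length_cons, List.length_nil]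
      rw [← hcx]
      push_cast
      omega
    · intro y
      rw [pvMaxLe_concat, ← hcnt y, ← hcx]
      rw [List.countP_append]
      by_cases hxy : x ≤ y
      · have hally : ends.countP (fun e => decide (e ≤ y)) = ends.length :=
          List.countP_eq_length.mpr (fun a ha => by simpa using le_trans (hall a ha) hxy)
        have h1 : List.countP (fun e => decide (e ≤ y)) [x] = 1 := by simp [hxy]
        rw [if_pos hxy, h1, hally]
        push_cast
        omega
      · have h1 : List.countP (fun e => decide (e ≤ y)) [x] = 0 := by simp [hxy]
        rw [if_neg hxy, h1]
        push_cast
        ring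

lemma pvFold_inv : ∀ (arr : List Int) (prev : List (Int × Int)) (ends : List Int) (best : Int),
    pvInv prev ends best →
    ((arr.foldl pvStepA ends).length : Int) = (arr.foldl pvStepB (prev, best)).2 := by
  intro arr
  induction arr with
  | nil => intro prev ends best h; exact h.2.1.symm
  | cons x t ih =>
    intro prev ends best h
    simp only [List.foldl_cons]
    exact ih _ _ _ (pvStep_inv prev ends best x h)

-- ===== VERDICT (by name: the statement is the Claim_ definition above) =====
theorem min_decreasing_partitions_spec : Claim_equal_min_decreasing_partitions := by
  intro arr _
  unfold Spec_min_decreasing_partitions min_decreasing_partitions min_decreasing_partitions_alt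
  exact pvFold_inv arr [] [] 0 ⟨List.Pairwise.nil, rfl, fun y => by simp [pvMaxLe]⟩
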